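-- pv_equiv track=rewrite | github.com/seljaks/santa2022 | src/santa_2022/common.py | compress_path
-- ===== SOURCE A (Python) =====
-- def compress_path(path):
--     r = [[] for _ in range(len(path[0]))]
--     for p in path:
--         for i in range(len(path[0])):
--             if len(r[i]) == 0 or r[i][-1] != p[i]:
--                 r[i].append(p[i])
--     mx = max([len(x) for x in r])
--
--     for rr in r:
--         while len(rr) < mx:
--             rr.append(rr[-1])
--     r = list(zip(*r))
--     for i in range(len(r)):
--         r[i] = list(r[i])
--     return r
-- ===== SOURCE B (Python) =====
-- def compress_path(path):
--     # Single row-major pass that builds the output matrix directly: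
--     # no column lists, no max/pad pass, no transpose. For each new row,
--     # a column whose value changes writes that value at its next slot and
--     # fills it down through all existing output rows (they were padding).
--     ncols = len(path[0])
--     out = [[path[0][i] for i in range(ncols)]]
--     fill = [1] * ncols  # fill[i] = number of distinct values emitted in column i
--     for p in path[1:]:
--         for i in range(ncols):
--             v = p[i]
--             if out[fill[i] - 1][i] != v:
--                 if fill[i] == len(out):
--                     out.append(list(out[-1]))
--                 for t in range(fill[i], len(out)):
--                     out[t][i] = v
--                 fill[i] += 1
--     return out
-- ===== Notes on version B (the rewrite author's own statement) =====
-- stated objective: alternative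
-- what changed: Replaces A's three-stage pipeline (per-column consecutive-dedup lists, then pad every column to the max length, then transpose with zip) by a single row-major pass that builds the output matrix directly: it keeps the rows emitted so far plus a per-column fill counter, and when a column's value changes it writes the new value at that column's next slot and fills it down through the already-emitted rows (which were provisional padding); no column lists, no max computation, no padding pass, no transpose.
-- outside the precondition, e.g. on compress_path([]): A raises IndexError, B raises IndexError; on compress_path([[]]): A raises ValueError, B returns [[]]
import Mathlib
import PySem

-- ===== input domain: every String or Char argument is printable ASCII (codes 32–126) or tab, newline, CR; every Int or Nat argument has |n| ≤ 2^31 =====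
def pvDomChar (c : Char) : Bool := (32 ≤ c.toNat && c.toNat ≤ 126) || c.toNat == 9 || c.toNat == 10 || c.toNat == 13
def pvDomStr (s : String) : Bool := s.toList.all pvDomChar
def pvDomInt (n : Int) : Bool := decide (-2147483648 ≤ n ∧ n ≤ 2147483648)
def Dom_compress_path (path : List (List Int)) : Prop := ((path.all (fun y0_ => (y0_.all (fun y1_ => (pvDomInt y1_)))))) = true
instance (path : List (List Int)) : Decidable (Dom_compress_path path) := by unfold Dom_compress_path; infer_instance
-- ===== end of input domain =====

-- B builds the output matrix in one row-major pass (fill-down writes) instead of A's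
-- compress-columns / pad / transpose pipeline; same values (alternative algorithm, no speed claim).

-- ===== PORT A =====
-- builtin helper used by A: list(zip(*rows)) — truncates at the shortest row
def pvZipAux : Nat → List (List Int) → List (List Int)
  | 0, _ => []
  | n+1, rows =>
    if rows.all (· ≠ []) then (rows.map (·.headD 0)) :: pvZipAux n (rows.map (·.tail)) else []

def pvZipStar (rows : List (List Int)) : List (List Int) :=
  match rows with
  | [] => []
  | r0 :: _ => pvZipAux r0.length rows

-- one step of A's inner body: 'if len(r[i]) == 0 or r[i][-1] != p[i]: r[i].append(p[i])'
def pvAstep (p : List Int) (r : List (List Int)) (i : Nat) : List (List Int) :=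
  if r.getD i [] = [] ∨ PySem.List.pyGet? (r.getD i []) (-1) ≠ some ((PySem.List.pyGet? p (i : Int)).getD 0)
  then r.set i (r.getD i [] ++ [(PySem.List.pyGet? p (i : Int)).getD 0]) else r

-- A's 'while len(rr) < mx: rr.append(rr[-1])'
def pvPadA (mx : Nat) (rr : List Int) : List Int :=
  if rr.length < mx then pvPadA mx (rr ++ [(PySem.List.pyGet? rr (-1)).getD 0]) else rr
termination_by mx - rr.length
decreasing_by simp_all; omega

def compress_path (path : List (List Int)) : List (List Int) :=
  let ncols := (path.headD []).length
  let r0 : List (List Int) := List.replicate ncols []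
  let r := path.foldl (fun r p => (List.range ncols).foldl (pvAstep p) r) r0
  let mx := (r.map List.length).foldl Nat.max 0
  pvZipStar (r.map (pvPadA mx))

-- ===== PORT B =====
-- value p[i] as the Python reads it (guarded by Pre_: i < p.length)
def pvV (p : List Int) (i : Nat) : Int := (PySem.List.pyGet? p (i : Int)).getD 0

-- 'out[t][i] = v'
def pvWrite (out : List (List Int)) (t i : Nat) (v : Int) : List (List Int) :=
  out.set t ((out.getD t []).set i v)

-- B's inner body for column i on row p
def pvBstep (p : List Int) (s : List (List Int) × List Nat) (i : Nat) :
    List (List Int) × List Nat :=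
  let out := s.1
  let fill := s.2
  let v := pvV p i
  let f := fill.getD i 0
  if (out.getD (f - 1) []).getD i 0 ≠ v then
    let out1 := if f = out.length then out ++ [out.getLastD []] else out
    let out2 := (List.range' f (out1.length - f)).foldl (fun o t => pvWrite o t i v) out1
    (out2, fill.set i (f + 1))
  else s

def compress_path_alt (path : List (List Int)) : List (List Int) :=
  let ncols := (path.headD []).length
  let row0 := (List.range ncols).map (fun i => pvV (path.headD []) i)
  (path.tail.foldl (fun s p => (List.range ncols).foldl (pvBstep p) s)
    ([row0], List.replicate ncols 1)).1

-- ===== PRECONDITION & SPEC =====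
-- Pre_ excludes exactly the inputs where the Python A raises: empty path or empty first row
-- (IndexError resp. ValueError on max([])), and rows shorter than the first row (IndexError on p[i]).
def Pre_compress_path (path : List (List Int)) : Prop :=
  path ≠ [] ∧ (path.headD []) ≠ [] ∧ ∀ p ∈ path, (path.headD []).length ≤ p.length
instance (path : List (List Int)) : Decidable (Pre_compress_path path) := by unfold Pre_compress_path; infer_instance

def pvWitness_compress_path : List (List Int) := [[1, 2], [1, 3], [4, 3]]

def Spec_compress_path (path : List (List Int)) (out : List (List Int)) : Prop := out = compress_path_alt path
instance (path : List (List Int)) (out : List (List Int)) : Decidable (Spec_compress_path path out) := by unfold Spec_compress_path; infer_instance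

-- ===== CLAIM (what is proved, stated in full; the proofs are below) =====
def Claim_equal_compress_path : Prop := ∀ (path : List (List Int)), Dom_compress_path path → Pre_compress_path path → Spec_compress_path path (compress_path path)

-- ===== LEMMAS AND PROOFS =====

-- ---------- A side: result = zipStar of padded compressed columns ----------

-- what A's inner step does to the single column it touches
def pvColStep (c : List Int) (v : Int) : List Int :=
  if c = [] ∨ PySem.List.pyGet? c (-1) ≠ some v then c ++ [v] else c

-- compressed column i of rows
def pvDcol (rows : List (List Int)) (i : Nat) : List Int :=
  rows.foldl (fun c p => pvColStep c (pvV p i)) []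

theorem pvAstep_eq (p : List Int) (r : List (List Int)) (i : Nat) (h : i < r.length) :
    pvAstep p r i = r.set i (pvColStep (r[i]'h) (pvV p i)) := by
  unfold pvAstep pvColStep pvV
  rw [List.getD_eq_getElem r [] h]
  split
  · rfl
  · exact (List.set_getElem_self _).symm

theorem pvAstep_length (p : List Int) (r : List (List Int)) (i : Nat) :
    (pvAstep p r i).length = r.length := by
  unfold pvAstep; split <;> simp

theorem innerFold_length (p : List Int) (m : Nat) (r : List (List Int)) :
    ((List.range m).foldl (pvAstep p) r).length = r.length := by
  induction m generalizing r with
  | zero => simp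
  | succ n ih => rw [List.range_succ, List.foldl_append]; simp [pvAstep_length, ih]

theorem innerFold_getElem? (p : List Int) (m : Nat) (r : List (List Int)) (hm : m ≤ r.length)
    (j : Nat) :
    ((List.range m).foldl (pvAstep p) r)[j]? =
      if j < m then (r[j]?.map (fun c => pvColStep c (pvV p j))) else r[j]? := by
  induction m generalizing j with
  | zero => simp
  | succ n ih =>
    have hn : n ≤ r.length := by omega
    have hnr : n < r.length := by omega
    have hlen := innerFold_length p n r
    have hnF : n < ((List.range n).foldl (pvAstep p) r).length := by omega
    have hFn : ((List.range n).foldl (pvAstep p) r)[n]? = r[n]? := by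
      rw [ih hn]; simp
    have hFget : ((List.range n).foldl (pvAstep p) r)[n]'hnF = r[n]'hnr := by
      have h1 := List.getElem?_eq_getElem hnF
      rw [hFn, List.getElem?_eq_getElem hnr] at h1
      exact (Option.some.inj h1).symm
    rw [List.range_succ, List.foldl_append, List.foldl_cons, List.foldl_nil,
      pvAstep_eq p _ n hnF, hFget, List.getElem?_set]
    by_cases hj : j = n
    · subst hj
      simp [hnF, List.getElem?_eq_getElem hnr]
    · rw [if_neg (fun h => hj h.symm), ih hn]
      rcases Nat.lt_or_ge j n with h | h
      · simp [h, Nat.lt_succ_of_lt h]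
      · have h1 : ¬ j < n := by omega
        have h2 : ¬ j < n + 1 := by omega
        simp [h1, h2]

theorem outerFold (ncols : Nat) (path : List (List Int)) (r : List (List Int))
    (hr : r.length = ncols) :
    path.foldl (fun r p => (List.range ncols).foldl (pvAstep p) r) r
      = r.mapIdx (fun i c => path.foldl (fun c p => pvColStep c (pvV p i)) c) := by
  induction path generalizing r with
  | nil =>
    simp only [List.foldl_nil]
    apply List.ext_getElem?
    intro j
    simp [List.getElem?_mapIdx, Option.map_id']
  | cons p ps ih =>
    simp only [List.foldl_cons]
    have hlen : ((List.range ncols).foldl (pvAstep p) r).length = ncols := by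
      rw [innerFold_length]; exact hr
    rw [ih _ hlen]
    apply List.ext_getElem?
    intro j
    simp only [List.getElem?_mapIdx]
    rw [innerFold_getElem? p ncols r (by omega) j]
    by_cases hj : j < ncols
    · simp only [if_pos hj]
      cases h : r[j]? <;> simp
    · simp only [if_neg hj]
      have : r[j]? = none := List.getElem?_eq_none (by omega)
      simp [this]

theorem mapIdx_replicate_nil (ncols : Nat) (f : Nat → List Int → List Int) :
    (List.replicate ncols ([] : List Int)).mapIdx f
      = (List.range ncols).map (fun i => f i []) := by
  apply List.ext_getElem?
  intro j
  by_cases hj : j < ncols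
  · simp [hj]
  · rw [List.getElem?_eq_none (by simpa using hj),
      List.getElem?_eq_none (by simpa using hj)]

theorem pad_eq_aux (mx : Nat) : ∀ (k : Nat) (rr : List Int), mx - rr.length ≤ k →
    pvPadA mx rr = rr ++ List.replicate (mx - rr.length) ((PySem.List.pyGet? rr (-1)).getD 0) := by
  intro k
  induction k with
  | zero =>
    intro rr hk
    rw [pvPadA, if_neg (by omega)]
    have : mx - rr.length = 0 := by omega
    simp [this]
  | succ k ih =>
    intro rr hk
    by_cases hlt : rr.length < mx
    · rw [pvPadA, if_pos hlt, ih _ (by simp; omega)]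
      rw [PySem.List.pyGet?_neg_one_append_singleton]
      have hrep : mx - rr.length
          = (mx - (rr ++ [(PySem.List.pyGet? rr (-1)).getD 0]).length) + 1 := by
        simp; omega
      rw [hrep, List.replicate_succ]
      simp
    · rw [pvPadA, if_neg hlt]
      have : mx - rr.length = 0 := by omega
      simp [this]

theorem pad_eq (mx : Nat) (rr : List Int) :
    pvPadA mx rr = rr ++ List.replicate (mx - rr.length) ((PySem.List.pyGet? rr (-1)).getD 0) :=
  pad_eq_aux mx (mx - rr.length) rr le_rfl

-- ---------- Nat.max fold helpers ----------

theorem fmax_init (ls : List Nat) : ∀ a : Nat, ls.foldl Nat.max a = Nat.max a (ls.foldl Nat.max 0) := by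
  induction ls with
  | nil => intro a; simp
  | cons y ys ih =>
    intro a
    simp only [List.foldl_cons]
    rw [ih (Nat.max a y), ih (Nat.max 0 y)]
    have hz : Nat.max 0 y = y := by simp
    rw [hz]
    exact Nat.max_assoc a y _

theorem le_fmax (ls : List Nat) (a : Nat) : a ≤ ls.foldl Nat.max a := by
  rw [fmax_init]; exact Nat.le_max_left _ _

theorem le_fmax_of_mem {ls : List Nat} {x : Nat} (h : x ∈ ls) (a : Nat) :
    x ≤ ls.foldl Nat.max a := by
  induction ls generalizing a with
  | nil => cases h
  | cons y ys ih =>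
    rcases List.mem_cons.mp h with h | h
    · subst h; exact le_trans (Nat.le_max_right a x) (le_fmax ys _)
    · exact ih h _

theorem fmax_le {ls : List Nat} {a b : Nat} (ha : a ≤ b) (h : ∀ x ∈ ls, x ≤ b) :
    ls.foldl Nat.max a ≤ b := by
  induction ls generalizing a with
  | nil => simpa using ha
  | cons y ys ih =>
    exact ih (Nat.max_le.mpr ⟨ha, h y (by simp)⟩) (fun x hx => h x (by simp [hx]))

theorem fmax_mem (ls : List Nat) : ls.foldl Nat.max 0 = 0 ∨ ls.foldl Nat.max 0 ∈ ls := by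
  induction ls with
  | nil => simp
  | cons x xs ih =>
    rw [List.foldl_cons, fmax_init]
    have hz : Nat.max 0 x = x := by simp
    rw [hz]
    rcases Nat.le_total (xs.foldl Nat.max 0) x with h | h
    · have hx : x.max (xs.foldl Nat.max 0) = x := Nat.max_eq_left h
      rw [hx]; right; simp
    · have hx : x.max (xs.foldl Nat.max 0) = xs.foldl Nat.max 0 := Nat.max_eq_right h
      rw [hx]
      rcases ih with h0 | hm
      · left; exact h0
      · right; exact List.mem_cons_of_mem _ hm

-- ---------- generic getD helpers ----------

theorem pvGetD_set_ne {α : Type} (l : List α) (t t' : Nat) (x d : α) (h : t' ≠ t) :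
    (l.set t x).getD t' d = l.getD t' d := by
  rw [List.getD_eq_getElem?_getD, List.getD_eq_getElem?_getD,
    List.getElem?_set_ne (fun hh => h hh.symm)]

theorem pvGetD_set_self {α : Type} (l : List α) (t : Nat) (x d : α) (h : t < l.length) :
    (l.set t x).getD t d = x := by
  rw [List.getD_eq_getElem?_getD, List.getElem?_eq_getElem (by simpa using h)]
  simp

theorem pvGetD_map_length (cs : List (List Int)) (j : Nat) (h : j < cs.length) :
    (cs.map List.length).getD j 0 = (cs.getD j []).length := by
  rw [List.getD_eq_getElem _ _ (by simpa using h), List.getD_eq_getElem _ _ h, List.getElem_map]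

theorem pvGetD_append_left {α : Type} (c c2 : List α) (t : Nat) (h : t < c.length) (d : α) :
    (c ++ c2).getD t d = c.getD t d := by
  rw [List.getD_eq_getElem _ _ (by simp; omega), List.getD_eq_getElem _ _ h,
    List.getElem_append_left h]

theorem pvGetD_concat_len {α : Type} (c : List α) (v d : α) :
    (c ++ [v]).getD c.length d = v := by
  rw [List.getD_eq_getElem _ _ (by simp)]
  simp

theorem pvGetLastD_eq_getD {α : Type} (l : List α) (d : α) :
    l.getLastD d = l.getD (l.length - 1) d := by
  rw [List.getLastD_eq_getLast?, List.getLast?_eq_getElem?, ← List.getD_eq_getElem?_getD]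

theorem pvPyGetLast (c : List Int) (h : c ≠ []) :
    (PySem.List.pyGet? c (-1)).getD 0 = c.getD (c.length - 1) 0 := by
  have hpos : 0 < c.length := List.length_pos_of_ne_nil h
  conv_lhs => rw [← List.dropLast_append_getLast h]
  rw [PySem.List.pyGet?_neg_one_append_singleton, Option.getD_some,
    List.getD_eq_getElem _ _ (by omega), List.getLast_eq_getElem]

theorem pvPyGet_last (c : List Int) (h : c ≠ []) :
    PySem.List.pyGet? c (-1) = some (c.getD (c.length - 1) 0) := by
  have hpos : 0 < c.length := List.length_pos_of_ne_nil h
  conv_lhs => rw [← List.dropLast_append_getLast h]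
  rw [PySem.List.pyGet?_neg_one_append_singleton]
  congr 1
  rw [List.getD_eq_getElem _ _ (by omega), List.getLast_eq_getElem]

theorem padded_length (mx : Nat) (c : List Int) (h : c.length ≤ mx) :
    (pvPadA mx c).length = mx := by
  rw [pad_eq]; simp; omega

theorem padded_getD (mx : Nat) (c : List Int) (hne : c ≠ []) (hL : c.length ≤ mx)
    (t : Nat) (ht : t < mx) :
    (pvPadA mx c).getD t 0 = c.getD (min t (c.length - 1)) 0 := by
  have hpos : 0 < c.length := List.length_pos_of_ne_nil hne
  rw [pad_eq]
  by_cases h : t < c.length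
  · rw [pvGetD_append_left _ _ _ h, Nat.min_eq_left (by omega)]
  · have h1 : min t (c.length - 1) = c.length - 1 := by omega
    rw [h1, List.getD_eq_getElem?_getD, List.getElem?_append_right (by omega),
      List.getElem?_replicate]
    have h2 : t - c.length < mx - c.length := by omega
    rw [if_pos h2, Option.getD_some, pvPyGetLast c hne]

-- ---------- B side invariant ----------

def pvInv (ncols : Nat) (out : List (List Int)) (fill : List Nat) (cs : List (List Int)) : Prop :=
  cs.length = ncols ∧ (∀ c ∈ cs, c ≠ []) ∧
  fill = cs.map List.length ∧
  out.length = (cs.map List.length).foldl Nat.max 0 ∧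
  (∀ t, t < out.length → (out.getD t []).length = ncols) ∧
  ∀ t i, t < out.length → i < ncols →
    (out.getD t []).getD i 0 = (cs.getD i []).getD (min t ((cs.getD i []).length - 1)) 0

theorem writeFold_length (i : Nat) (v : Int) :
    ∀ (n f : Nat) (o : List (List Int)),
    ((List.range' f n).foldl (fun o t => pvWrite o t i v) o).length = o.length := by
  intro n
  induction n with
  | zero => intro f o; simp
  | succ n ih =>
    intro f o
    rw [List.range'_succ, List.foldl_cons, ih]
    simp [pvWrite]

theorem writeFold_getD (i : Nat) (v : Int) :
    ∀ (n f : Nat) (o : List (List Int)) (t : Nat), t < o.length →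
    (((List.range' f n).foldl (fun o t => pvWrite o t i v) o).getD t []) =
      if f ≤ t ∧ t < f + n then (o.getD t []).set i v else o.getD t [] := by
  intro n
  induction n with
  | zero =>
    intro f o t ht
    have hc : ¬ (f ≤ t ∧ t < f + 0) := by omega
    rw [List.range'_zero, List.foldl_nil, if_neg hc]
  | succ n ih =>
    intro f o t ht
    rw [List.range'_succ, List.foldl_cons]
    have hw : (pvWrite o f i v).length = o.length := by simp [pvWrite]
    rw [ih (f + 1) (pvWrite o f i v) t (by rw [hw]; exact ht)]
    by_cases h1 : t = f
    · subst h1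
      rw [if_neg (by omega), if_pos (by omega)]
      exact pvGetD_set_self _ _ _ _ ht
    · have hne : (pvWrite o f i v).getD t [] = o.getD t [] := pvGetD_set_ne o f t _ [] h1
      rw [hne]
      by_cases h2 : f + 1 ≤ t ∧ t < f + 1 + n
      · rw [if_pos h2, if_pos (by omega)]
      · rw [if_neg h2, if_neg (by omega)]

-- core of the change branch: the fill-down write restores the invariant
theorem pvBstep_core (ncols : Nat) (cs : List (List Int)) (i : Nat) (v : Int)
    (out1 : List (List Int)) (M1 : Nat)
    (hcs : cs.length = ncols) (hi : i < ncols)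
    (hne : ∀ c ∈ cs, c ≠ [])
    (hL1 : 1 ≤ (cs.getD i []).length)
    (hLlt : (cs.getD i []).length < M1)
    (hlen1 : out1.length = M1)
    (hrows1 : ∀ t, t < M1 → (out1.getD t []).length = ncols)
    (hent1 : ∀ t i', t < M1 → i' < ncols →
      (out1.getD t []).getD i' 0 = (cs.getD i' []).getD (min t ((cs.getD i' []).length - 1)) 0)
    (hM' : ((cs.set i ((cs.getD i []) ++ [v])).map List.length).foldl Nat.max 0 = M1) :
    pvInv ncols
      ((List.range' (cs.getD i []).length (M1 - (cs.getD i []).length)).foldl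
        (fun o t => pvWrite o t i v) out1)
      ((cs.map List.length).set i ((cs.getD i []).length + 1))
      (cs.set i ((cs.getD i []) ++ [v])) := by
  have hicl : i < cs.length := by omega
  have hflen : ∀ t : Nat,
      ((List.range' (cs.getD i []).length (M1 - (cs.getD i []).length)).foldl
        (fun o t => pvWrite o t i v) out1).length = out1.length := fun _ =>
    writeFold_length i v _ _ out1
  refine ⟨by simp [hcs], ?_, ?_, ?_, ?_, ?_⟩
  · intro c' hc'
    rcases List.mem_or_eq_of_mem_set hc' with h | h
    · exact hne _ h
    · subst h; simp
  · rw [List.map_set]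
    simp
  · rw [writeFold_length, hlen1, hM']
  · intro t ht
    rw [writeFold_length, hlen1] at ht
    rw [writeFold_getD i v _ _ out1 t (by omega)]
    split_ifs with hc
    · rw [List.length_set]; exact hrows1 t ht
    · exact hrows1 t ht
  · intro t i' ht hi'
    rw [writeFold_length, hlen1] at ht
    have hrl : (out1.getD t []).length = ncols := hrows1 t ht
    rw [writeFold_getD i v _ _ out1 t (by omega)]
    by_cases hii : i' = i
    · subst hii
      rw [pvGetD_set_self cs i' _ [] hicl]
      by_cases hLe : (cs.getD i' []).length ≤ t
      · rw [if_pos ⟨hLe, by omega⟩, pvGetD_set_self _ _ _ _ (by omega)]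
        have hmin : min t ((cs.getD i' [] ++ [v]).length - 1) = (cs.getD i' []).length := by
          simp only [List.length_append, List.length_cons, List.length_nil]
          omega
        rw [hmin, pvGetD_concat_len]
      · rw [if_neg (by omega), hent1 t i' ht hi']
        have h1 : min t ((cs.getD i' []).length - 1) = t := by omega
        have h2 : min t ((cs.getD i' [] ++ [v]).length - 1) = t := by
          simp only [List.length_append, List.length_cons, List.length_nil]
          omega
        rw [h1, h2, pvGetD_append_left _ _ _ (by omega)]
    · rw [pvGetD_set_ne cs i i' _ [] hii]
      split_ifs with hc
      · rw [pvGetD_set_ne _ _ _ _ _ hii]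
        exact hent1 t i' ht hi'
      · exact hent1 t i' ht hi'

theorem pvBstep_inv (ncols : Nat) (p : List Int) (out : List (List Int)) (fill : List Nat)
    (cs : List (List Int)) (i : Nat) (hi : i < ncols)
    (h : pvInv ncols out fill cs) :
    pvInv ncols (pvBstep p (out, fill) i).1 (pvBstep p (out, fill) i).2
      (cs.set i (pvColStep (cs.getD i []) (pvV p i))) := by
  obtain ⟨hcs, hne, hfill, hM, hrows, hent⟩ := h
  have hicl : i < cs.length := by omega
  have hceq : cs.getD i [] = cs[i]'hicl := List.getD_eq_getElem cs [] hicl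
  have hc_ne : cs.getD i [] ≠ [] := by rw [hceq]; exact hne _ (List.getElem_mem hicl)
  have hL1 : 1 ≤ (cs.getD i []).length := List.length_pos_of_ne_nil hc_ne
  have hLle : ∀ j, j < ncols → (cs.getD j []).length ≤ out.length := by
    intro j hj
    have hjl : j < cs.length := by omega
    have : (cs.getD j []).length ∈ cs.map List.length := by
      rw [List.getD_eq_getElem cs [] hjl]
      exact List.mem_map_of_mem (List.getElem_mem hjl)
    rw [hM]
    exact le_fmax_of_mem this 0
  have hLM : (cs.getD i []).length ≤ out.length := hLle i hi
  have hfi : fill.getD i 0 = (cs.getD i []).length := by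
    rw [hfill, pvGetD_map_length cs i hicl]
  have hM1 : 1 ≤ out.length := by omega
  have hlast : (out.getD (fill.getD i 0 - 1) []).getD i 0
      = (cs.getD i []).getD ((cs.getD i []).length - 1) 0 := by
    rw [hfi, hent ((cs.getD i []).length - 1) i (by omega) hi, Nat.min_self]
  have hpy := pvPyGet_last (cs.getD i []) hc_ne
  by_cases hv : (cs.getD i []).getD ((cs.getD i []).length - 1) 0 = pvV p i
  · have hcond : ¬ ((out.getD (fill.getD i 0 - 1) []).getD i 0 ≠ pvV p i) := by
      rw [hlast, hv]; simp
    have hstep : pvColStep (cs.getD i []) (pvV p i) = cs.getD i [] := by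
      unfold pvColStep
      rw [if_neg]
      rintro (h1 | h2)
      · exact hc_ne h1
      · exact h2 (by rw [hpy, hv])
    have hset : cs.set i (pvColStep (cs.getD i []) (pvV p i)) = cs := by
      rw [hstep, hceq]
      exact List.set_getElem_self _
    rw [hset]
    simp only [pvBstep]
    rw [if_neg hcond]
    exact ⟨hcs, hne, hfill, hM, hrows, hent⟩
  · have hcond : (out.getD (fill.getD i 0 - 1) []).getD i 0 ≠ pvV p i := by
      rw [hlast]; exact hv
    have hstep : pvColStep (cs.getD i []) (pvV p i) = cs.getD i [] ++ [pvV p i] := by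
      unfold pvColStep
      rw [if_pos (Or.inr (by rw [hpy]; simpa using hv))]
    rw [hstep]
    simp only [pvBstep]
    rw [if_pos hcond]
    simp only
    rw [hfi, hfill]
    have hlens : cs.map List.length ≠ [] := by
      intro hnil
      have := congrArg List.length hnil
      simp [hcs] at this
      omega
    by_cases hLMeq : (cs.getD i []).length = out.length
    · rw [if_pos hLMeq]
      have hlen1 : (out ++ [out.getLastD []]).length = out.length + 1 := by simp
      rw [hlen1]
      have hout_ne : out ≠ [] := by
        intro hnil; rw [hnil] at hM1; simp at hM1
      have hlastrow : out.getLastD [] = out.getD (out.length - 1) [] := pvGetLastD_eq_getD out []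
      have hrows1 : ∀ t, t < out.length + 1 → ((out ++ [out.getLastD []]).getD t []).length = ncols := by
        intro t ht
        by_cases htl : t < out.length
        · rw [pvGetD_append_left _ _ _ htl]; exact hrows t htl
        · have hteq : t = out.length := by omega
          subst hteq
          rw [pvGetD_concat_len, hlastrow]
          exact hrows _ (by omega)
      have hent1 : ∀ t i', t < out.length + 1 → i' < ncols →
          ((out ++ [out.getLastD []]).getD t []).getD i' 0
            = (cs.getD i' []).getD (min t ((cs.getD i' []).length - 1)) 0 := by
        intro t i' ht hi'
        by_cases htl : t < out.length
        · rw [pvGetD_append_left _ _ _ htl]; exact hent t i' htl hi'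
        · have hteq : t = out.length := by omega
          subst hteq
          rw [pvGetD_concat_len, hlastrow, hent (out.length - 1) i' (by omega) hi']
          have hle := hLle i' hi'
          have h1 : min (out.length - 1) ((cs.getD i' []).length - 1)
              = (cs.getD i' []).length - 1 := by omega
          have h2 : min out.length ((cs.getD i' []).length - 1)
              = (cs.getD i' []).length - 1 := by omega
          rw [h1, h2]
      have hM' : ((cs.set i ((cs.getD i []) ++ [pvV p i])).map List.length).foldl Nat.max 0
          = out.length + 1 := by
        rw [List.map_set]
        apply le_antisymm
        · apply fmax_le (by omega)
          intro x hx
          rcases List.mem_or_eq_of_mem_set hx with hxm | hxe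
          · have hxle := le_fmax_of_mem hxm 0
            rw [← hM] at hxle; omega
          · simp only [List.length_append, List.length_cons, List.length_nil] at hxe
            omega
        · have hmem : (cs.getD i []).length + 1
              ∈ (cs.map List.length).set i ((cs.getD i [] ++ [pvV p i]).length) := by
            have hlt : i < ((cs.map List.length).set i ((cs.getD i [] ++ [pvV p i]).length)).length := by
              simp; omega
            have hg : ((cs.map List.length).set i ((cs.getD i [] ++ [pvV p i]).length))[i]'hlt
                = (cs.getD i []).length + 1 := by
              rw [List.getElem_set]
              simp
            rw [← hg]
            exact List.getElem_mem hlt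
          have := le_fmax_of_mem hmem 0
          omega
      exact pvBstep_core ncols cs i (pvV p i) _ _ hcs hi hne hL1 (by omega) hlen1 hrows1 hent1 hM'
    · rw [if_neg hLMeq]
      have hLlt : (cs.getD i []).length < out.length := by omega
      have hM' : ((cs.set i ((cs.getD i []) ++ [pvV p i])).map List.length).foldl Nat.max 0
          = out.length := by
        rw [List.map_set]
        apply le_antisymm
        · apply fmax_le (by omega)
          intro x hx
          rcases List.mem_or_eq_of_mem_set hx with hxm | hxe
          · have hxle := le_fmax_of_mem hxm 0
            rw [← hM] at hxle; omega
          · simp only [List.length_append, List.length_cons, List.length_nil] at hxe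
            omega
        · rcases fmax_mem (cs.map List.length) with h0 | hmem
          · rw [← hM] at *; omega
          · obtain ⟨j, hj, hjv⟩ := List.getElem_of_mem hmem
            have hji : j ≠ i := by
              intro hje; subst hje
              rw [List.getElem_map] at hjv
              rw [← List.getD_eq_getElem cs [] (by simpa using hj)] at hjv
              omega
            have hmem2 : out.length ∈ (cs.map List.length).set i ((cs.getD i [] ++ [pvV p i]).length) := by
              have hlt : j < ((cs.map List.length).set i ((cs.getD i [] ++ [pvV p i]).length)).length := by
                simpa using hj
              have hg : ((cs.map List.length).set i ((cs.getD i [] ++ [pvV p i]).length))[j]'hlt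
                  = out.length := by
                rw [List.getElem_set, if_neg (fun hh => hji hh.symm), hjv, hM]
              rw [← hg]
              exact List.getElem_mem hlt
            exact le_fmax_of_mem hmem2 0
      exact pvBstep_core ncols cs i (pvV p i) _ _ hcs hi hne hL1 hLlt rfl
        (fun t ht => hrows t ht) (fun t i' ht hi' => hent t i' ht hi') hM'

-- cs updated at indices < m
def pvCsUpd (p : List Int) (cs : List (List Int)) (m : Nat) : List (List Int) :=
  cs.mapIdx (fun i c => if i < m then pvColStep c (pvV p i) else c)

theorem pvCsUpd_zero (p : List Int) (cs : List (List Int)) : pvCsUpd p cs 0 = cs := by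
  unfold pvCsUpd
  apply List.ext_getElem?
  intro j
  simp [List.getElem?_mapIdx, Option.map_id']

theorem pvCsUpd_succ (p : List Int) (cs : List (List Int)) (m : Nat) (hm : m < cs.length) :
    (pvCsUpd p cs m).set m (pvColStep ((pvCsUpd p cs m).getD m []) (pvV p m))
      = pvCsUpd p cs (m + 1) := by
  have hgm : (pvCsUpd p cs m).getD m [] = cs.getD m [] := by
    unfold pvCsUpd
    rw [List.getD_eq_getElem _ _ (by simpa using hm), List.getD_eq_getElem _ _ hm]
    rw [List.getElem_mapIdx]
    simp
  rw [hgm]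
  unfold pvCsUpd
  apply List.ext_getElem?
  intro j
  rw [List.getElem?_set]
  by_cases hj : j < cs.length
  · by_cases hjm : m = j
    · subst hjm
      rw [if_pos rfl, if_pos (by simpa using hm)]
      rw [List.getElem?_mapIdx, List.getElem?_eq_getElem hj]
      simp only [Option.map_some]
      rw [List.getD_eq_getElem cs [] hm]
      simp
    · rw [if_neg hjm, List.getElem?_mapIdx, List.getElem?_mapIdx]
      rcases Nat.lt_or_ge j m with h | h
      · simp [List.getElem?_eq_getElem hj, h, Nat.lt_succ_of_lt h]
      · have h1 : ¬ j < m := by omega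
        have h2 : ¬ j < m + 1 := by omega
        simp [List.getElem?_eq_getElem hj, h1, h2]
  · rw [if_neg (by omega : ¬ m = j), List.getElem?_mapIdx, List.getElem?_mapIdx,
      List.getElem?_eq_none (show cs.length ≤ j by omega)]
    simp

theorem innerB_aux (ncols : Nat) (p : List Int) :
    ∀ (m : Nat), m ≤ ncols → ∀ (out : List (List Int)) (fill : List Nat) (cs : List (List Int)),
    pvInv ncols out fill cs →
    pvInv ncols ((List.range m).foldl (pvBstep p) (out, fill)).1
      ((List.range m).foldl (pvBstep p) (out, fill)).2
      (pvCsUpd p cs m) := by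
  intro m
  induction m with
  | zero =>
    intro _ out fill cs h
    rw [pvCsUpd_zero]
    exact h
  | succ m ih =>
    intro hm out fill cs h
    rw [List.range_succ, List.foldl_append, List.foldl_cons, List.foldl_nil]
    have hinv := ih (by omega) out fill cs h
    have hcsl : (pvCsUpd p cs m).length = cs.length := by simp [pvCsUpd]
    have hstep := pvBstep_inv ncols p
      ((List.range m).foldl (pvBstep p) (out, fill)).1
      ((List.range m).foldl (pvBstep p) (out, fill)).2
      (pvCsUpd p cs m) m (by omega) hinv
    rw [pvCsUpd_succ p cs m (by rw [h.1]; omega)] at hstep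
    simpa using hstep

theorem innerB (ncols : Nat) (p : List Int) (out : List (List Int)) (fill : List Nat)
    (cs : List (List Int)) (h : pvInv ncols out fill cs) :
    pvInv ncols ((List.range ncols).foldl (pvBstep p) (out, fill)).1
      ((List.range ncols).foldl (pvBstep p) (out, fill)).2
      (cs.mapIdx (fun i c => pvColStep c (pvV p i))) := by
  have h1 := innerB_aux ncols p ncols le_rfl out fill cs h
  have h2 : pvCsUpd p cs ncols = cs.mapIdx (fun i c => pvColStep c (pvV p i)) := by
    unfold pvCsUpd
    apply List.ext_getElem?
    intro j
    rw [List.getElem?_mapIdx, List.getElem?_mapIdx]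
    by_cases hj : j < cs.length
    · have hjn : j < ncols := by rw [← h.1]; exact hj
      simp [List.getElem?_eq_getElem hj, hjn]
    · have hn : cs[j]? = none := List.getElem?_eq_none (by omega)
      simp [hn]
  rw [h2] at h1
  exact h1

theorem outerB (ncols : Nat) (rows : List (List Int)) :
    ∀ (out : List (List Int)) (fill : List Nat) (cs : List (List Int)),
    pvInv ncols out fill cs →
    pvInv ncols
      (rows.foldl (fun s p => (List.range ncols).foldl (pvBstep p) s) (out, fill)).1
      (rows.foldl (fun s p => (List.range ncols).foldl (pvBstep p) s) (out, fill)).2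
      (rows.foldl (fun cs p => cs.mapIdx (fun i c => pvColStep c (pvV p i))) cs) := by
  induction rows with
  | nil => intro out fill cs h; exact h
  | cons p ps ih =>
    intro out fill cs h
    simp only [List.foldl_cons]
    have h1 := innerB ncols p out fill cs h
    have h2 := ih ((List.range ncols).foldl (pvBstep p) (out, fill)).1
      ((List.range ncols).foldl (pvBstep p) (out, fill)).2 _ h1
    simpa using h2

-- ---------- column-sequence bookkeeping ----------

def pvCs (ncols : Nat) (rows : List (List Int)) : List (List Int) :=
  (List.range ncols).map (fun i => pvDcol rows i)

theorem csStep_eq (ncols : Nat) (rows : List (List Int)) (p : List Int) :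
    (pvCs ncols rows).mapIdx (fun i c => pvColStep c (pvV p i)) = pvCs ncols (rows ++ [p]) := by
  unfold pvCs pvDcol
  apply List.ext_getElem?
  intro j
  rw [List.getElem?_mapIdx]
  by_cases hj : j < ncols
  · rw [List.getElem?_map, List.getElem?_map, List.getElem?_eq_getElem (by simpa using hj)]
    simp [List.getElem_range, List.foldl_append]
  · rw [List.getElem?_map, List.getElem?_map, List.getElem?_eq_none (by simpa using hj)]
    simp

theorem cs_foldl (ncols : Nat) (rows : List (List Int)) :
    ∀ acc : List (List Int),
    rows.foldl (fun cs p => cs.mapIdx (fun i c => pvColStep c (pvV p i))) (pvCs ncols acc)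
      = pvCs ncols (acc ++ rows) := by
  induction rows with
  | nil => intro acc; simp
  | cons p ps ih =>
    intro acc
    rw [List.foldl_cons, csStep_eq, ih]
    simp

-- ---------- zipStar description ----------

theorem zipAux_desc : ∀ (n : Nat) (rows : List (List Int)), (∀ r ∈ rows, r.length = n) →
    pvZipAux n rows = (List.range n).map (fun t => rows.map (fun r => r.getD t 0)) := by
  intro n
  induction n with
  | zero => intro rows h; simp [pvZipAux]
  | succ n ih =>
    intro rows h
    rw [pvZipAux]
    have hne : rows.all (· ≠ []) = true := by
      simp only [List.all_eq_true, decide_eq_true_eq]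
      intro r hr hnil
      have := h r hr
      rw [hnil] at this
      simp at this
    rw [if_pos hne]
    have htl : ∀ r ∈ rows.map (·.tail), r.length = n := by
      intro r hr
      obtain ⟨r0, hr0, rfl⟩ := List.mem_map.mp hr
      have := h r0 hr0
      simp [this]
    rw [ih _ htl, List.range_succ_eq_map, List.map_cons, List.map_map]
    congr 1
    · apply List.map_congr_left
      intro r hr
      cases r <;> simp
    · apply List.map_congr_left
      intro t ht
      simp only [Function.comp]
      rw [List.map_map]
      apply List.map_congr_left
      intro r hr
      have hlen := h r hr
      cases r with
      | nil => simp at hlen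
      | cons a as => simp

-- ---------- initial state and final extraction ----------

theorem inv_init (p0 : List Int) (h : p0 ≠ []) :
    pvInv p0.length [(List.range p0.length).map (fun i => pvV p0 i)]
      (List.replicate p0.length 1) (pvCs p0.length [p0]) := by
  have hn : 1 ≤ p0.length := List.length_pos_of_ne_nil h
  have hcs : pvCs p0.length [p0] = (List.range p0.length).map (fun i => [pvV p0 i]) := by
    unfold pvCs pvDcol
    apply List.map_congr_left
    intro i _
    simp [pvColStep]
  rw [hcs]
  have hmaplen : ((List.range p0.length).map (fun i => [pvV p0 i])).map List.length
      = List.replicate p0.length 1 := by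
    rw [List.map_map]
    apply List.ext_getElem?
    intro j
    by_cases hj : j < p0.length
    · simp [hj, Function.comp]
    · rw [List.getElem?_eq_none (by simpa using hj), List.getElem?_eq_none (by simpa using hj)]
  refine ⟨by simp, ?_, hmaplen.symm, ?_, ?_, ?_⟩
  · intro c hc
    obtain ⟨i, _, rfl⟩ := List.mem_map.mp hc
    simp
  · rw [hmaplen]
    have hle : (List.replicate p0.length 1).foldl Nat.max 0 ≤ 1 := by
      apply fmax_le (by omega)
      intro x hx
      have := List.eq_of_mem_replicate hx
      omega
    have hge : 1 ≤ (List.replicate p0.length 1).foldl Nat.max 0 := by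
      apply le_fmax_of_mem
      exact List.mem_replicate.mpr ⟨by omega, rfl⟩
    simp
    omega
  · intro t ht
    simp only [List.length_cons, List.length_nil] at ht
    have ht0 : t = 0 := by omega
    subst ht0
    simp
  · intro t i ht hi
    simp only [List.length_cons, List.length_nil] at ht
    have ht0 : t = 0 := by omega
    subst ht0
    have h1 : ((List.range p0.length).map (fun i => [pvV p0 i])).getD i []
        = [pvV p0 i] := by
      rw [List.getD_eq_getElem _ _ (by simpa using hi)]
      simp
    rw [h1, List.getD_cons_zero, List.getD_eq_getElem _ _ (by simpa using hi)]
    simp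

theorem ext_rows (n : Nat) (a b : List Int) (hla : a.length = n) (hlb : b.length = n)
    (h : ∀ j, j < n → a.getD j 0 = b.getD j 0) : a = b := by
  apply List.ext_getElem (by omega)
  intro i h1 h2
  rw [← List.getD_eq_getElem a 0 h1, ← List.getD_eq_getElem b 0 h2]
  exact h i (by omega)

theorem final_out (ncols : Nat) (out : List (List Int)) (fill : List Nat) (cs : List (List Int))
    (hn : 1 ≤ ncols) (h : pvInv ncols out fill cs) :
    out = pvZipStar (cs.map (pvPadA ((cs.map List.length).foldl Nat.max 0))) := by
  obtain ⟨hcs, hne, hfill, hM, hrows, hent⟩ := h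
  have hcne : cs ≠ [] := by
    intro hnil; rw [hnil] at hcs; simp at hcs; omega
  obtain ⟨c0, crest, rfl⟩ := List.exists_cons_of_ne_nil hcne
  set mx := (((c0 :: crest).map List.length).foldl Nat.max 0) with hmx
  have hLle : ∀ j, j < ncols → ((c0 :: crest).getD j []).length ≤ mx := by
    intro j hj
    have hjl : j < (c0 :: crest).length := by omega
    have hmem : ((c0 :: crest).getD j []).length ∈ (c0 :: crest).map List.length := by
      rw [List.getD_eq_getElem _ [] hjl]
      exact List.mem_map_of_mem (List.getElem_mem hjl)
    exact le_fmax_of_mem hmem 0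
  have hL1 : ∀ j, j < ncols → 1 ≤ ((c0 :: crest).getD j []).length := by
    intro j hj
    have hjl : j < (c0 :: crest).length := by omega
    rw [List.getD_eq_getElem _ [] hjl]
    exact List.length_pos_of_ne_nil (hne _ (List.getElem_mem hjl))
  have hmx1 : 1 ≤ mx := le_trans (hL1 0 hn) (hLle 0 hn)
  have hpadlen : ∀ c ∈ (c0 :: crest), (pvPadA mx c).length = mx := by
    intro c hc
    exact padded_length mx c (le_fmax_of_mem (List.mem_map_of_mem hc) 0)
  have hzs : pvZipStar ((c0 :: crest).map (pvPadA mx))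
      = pvZipAux mx ((c0 :: crest).map (pvPadA mx)) := by
    simp only [List.map_cons, pvZipStar]
    rw [hpadlen c0 (by simp)]
  rw [hzs, zipAux_desc mx _ (fun r hr => by
    obtain ⟨c, hc, rfl⟩ := List.mem_map.mp hr
    exact hpadlen c hc)]
  apply List.ext_getElem?
  intro t
  by_cases ht : t < mx
  · have htout : t < out.length := by rw [hM]; exact ht
    rw [List.getElem?_eq_getElem htout, List.getElem?_eq_getElem (by simpa using ht)]
    rw [List.getElem_map, List.getElem_range]
    congr 1
    rw [← List.getD_eq_getElem out [] htout]
    apply ext_rows ncols _ _ (hrows t htout) (by simpa using hcs)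
    intro j hj
    have hjl : j < (c0 :: crest).length := by omega
    rw [hent t j htout hj]
    have hlenmap : j < (((c0 :: crest).map (pvPadA mx)).map (fun r => r.getD t 0)).length := by
      simpa using hjl
    rw [List.getD_eq_getElem _ _ hlenmap, List.getElem_map, List.getElem_map]
    rw [← List.getD_eq_getElem (c0 :: crest) [] hjl]
    rw [padded_getD mx _ (by rw [List.getD_eq_getElem _ [] hjl]; exact hne _ (List.getElem_mem hjl))
      (hLle j hj) t ht]
  · have h1 : out.length ≤ t := by rw [hM]; omega
    have h2 : ((List.range mx).map
        (fun t => ((c0 :: crest).map (pvPadA mx)).map (fun r => r.getD t 0))).length ≤ t := by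
      simp only [List.length_map, List.length_range]
      omega
    rw [List.getElem?_eq_none h1, List.getElem?_eq_none h2]

-- ===== VERDICT (by name: the statement is the Claim_ definition above) =====
theorem compress_path_spec : Claim_equal_compress_path := by
  intro path hdom hpre
  obtain ⟨hnil, hhd, hlenrows⟩ := hpre
  unfold Spec_compress_path
  cases path with
  | nil => exact absurd rfl hnil
  | cons p0 rest =>
    have hhd0 : p0 ≠ [] := by simpa using hhd
    have hnc : 1 ≤ p0.length := List.length_pos_of_ne_nil hhd0
    have hinv0 := inv_init p0 hhd0
    have hinv := outerB p0.length rest _ _ _ hinv0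
    rw [cs_foldl p0.length rest [p0]] at hinv
    simp only [List.cons_append, List.nil_append] at hinv
    have hB := final_out p0.length _ _ _ hnc hinv
    simp only [compress_path, compress_path_alt, List.headD_cons, List.tail_cons]
    rw [outerFold p0.length (p0 :: rest) _ (by simp), mapIdx_replicate_nil]
    rw [show (List.range p0.length).map
          (fun i => (p0 :: rest).foldl (fun c p => pvColStep c (pvV p i)) [])
        = pvCs p0.length (p0 :: rest) from rfl]
    exact hB.symm
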